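-- pv_equiv track=rewrite | github.com/GreenBeanGravy/FA11y | lib/utilities/utilities.py | generate_map_specific_game_objects_config
-- ===== SOURCE A (Python) =====
-- from typing import Dict, Tuple, Optional, Any, Union, List, Set
--
-- def get_game_objects_config_order():
--     """Get the order of game objects as they appear in the config"""
--     # This defines the canonical order of game objects as they appear in the default config
--     return [
--         'Ammoboxes', 'BlackMarketCases', 'Bushes', 'Campfires', 'CapturePoints',
--         'Carssport', 'Carssuv', 'Cashregisters', 'Chests', 'Dumpsters',
--         'Fishingholes', 'Fishingrods', 'Gasstations', 'Geysers', 'Gold',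
--         'HiveStashes', 'IceBoxes', 'Jobboards', 'Jobboardssupplydrop',
--         'Jobboardstreasure', 'JobboardsVehicle', 'Launchpads', 'Mushrooms',
--         'OxrBunkers', 'OxrChests', 'Rebootvans', 'Safes', 'Slurpbarrels',
--         'Slurptrucks', 'SwarmerNests', 'Ziplines'
--     ]
--
-- def generate_map_specific_game_objects_config(map_name: str, object_types: List[str]) -> str:
--     """Generate config section content for a specific map's game objects"""
--     config_lines = []
--
--     # Get the canonical order
--     config_order = get_game_objects_config_order()
--
--     # Order object types based on config order, with unknown types at the end
--     ordered_types = []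
--
--     # First, add types that are in the canonical order
--     for canonical_type in config_order:
--         if canonical_type in object_types:
--             ordered_types.append(canonical_type)
--
--     # Then add any types not in canonical order (alphabetically sorted)
--     remaining_types = sorted([t for t in object_types if t not in config_order])
--     ordered_types.extend(remaining_types)
--
--     for obj_type in ordered_types:
--         clean_type = obj_type.replace(' ', '').replace('_', '').replace('-', '')
--
--         # Default values based on object type
--         default_track = 'true'
--         default_distance = '8.0'
--         default_announce = 'false'
--
--         # Set specific defaults for certain object types
--         if obj_type in ['Ammoboxes', 'Campfires', 'Carssport', 'Carssuv', 'Cashregisters', 'Gold', 'Fishingrods', 'Jobboards', 'Jobboardssupplydrop', 'Jobboardstreasure', 'Mushrooms']: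
--             default_distance = '1'
--             default_announce = 'true'
--         elif obj_type in ['Bushes']:
--             default_distance = '3'
--         elif obj_type in ['Rebootvans', 'Gasstations']:
--             default_distance = '3'
--             default_announce = 'true'
--         elif obj_type in ['Chests']:
--             default_distance = '5'
--         elif obj_type in ['Launchpads']:
--             default_track = 'false'
--             default_distance = '0'
--         elif obj_type in ['Bushes', 'Fishingholes']:
--             default_announce = 'false'
--         elif obj_type in ['Slurpbarrels', 'Slurptrucks', 'Safes', 'Ziplines']:
--             default_announce = 'false'
--
--         config_lines.append(f'TrackVisits{clean_type} = {default_track} "Track visits to {obj_type} objects in matches."')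
--         config_lines.append(f'{clean_type}VisitDistance = {default_distance} "Distance in meters to mark {obj_type} as visited."')
--         config_lines.append(f'Announce{clean_type}Visits = {default_announce} "Announce when {obj_type} objects are reached."')
--
--     return '\n'.join(config_lines)
-- ===== SOURCE B (Python) =====
-- from typing import List
--
-- _CANON = [
--     'Ammoboxes', 'BlackMarketCases', 'Bushes', 'Campfires', 'CapturePoints',
--     'Carssport', 'Carssuv', 'Cashregisters', 'Chests', 'Dumpsters',
--     'Fishingholes', 'Fishingrods', 'Gasstations', 'Geysers', 'Gold',
--     'HiveStashes', 'IceBoxes', 'Jobboards', 'Jobboardssupplydrop',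
--     'Jobboardstreasure', 'JobboardsVehicle', 'Launchpads', 'Mushrooms',
--     'OxrBunkers', 'OxrChests', 'Rebootvans', 'Safes', 'Slurpbarrels',
--     'Slurptrucks', 'SwarmerNests', 'Ziplines'
-- ]
--
-- _BASE = ('true', '8.0', 'false')
--
-- # (track, distance, announce) for every type that deviates from _BASE.
-- _SPECIAL = {
--     'Ammoboxes': ('true', '1', 'true'),
--     'Campfires': ('true', '1', 'true'),
--     'Carssport': ('true', '1', 'true'),
--     'Carssuv': ('true', '1', 'true'),
--     'Cashregisters': ('true', '1', 'true'),
--     'Gold': ('true', '1', 'true'),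
--     'Fishingrods': ('true', '1', 'true'),
--     'Jobboards': ('true', '1', 'true'),
--     'Jobboardssupplydrop': ('true', '1', 'true'),
--     'Jobboardstreasure': ('true', '1', 'true'),
--     'Mushrooms': ('true', '1', 'true'),
--     'Bushes': ('true', '3', 'false'),
--     'Rebootvans': ('true', '3', 'true'),
--     'Gasstations': ('true', '3', 'true'),
--     'Chests': ('true', '5', 'false'),
--     'Launchpads': ('false', '0', 'false'),
-- }
--
--
-- def _block(obj_type: str) -> str:
--     clean = obj_type.replace(' ', '').replace('_', '').replace('-', '')
--     track, distance, announce = _SPECIAL.get(obj_type, _BASE)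
--     return (
--         f'TrackVisits{clean} = {track} "Track visits to {obj_type} objects in matches."\n'
--         f'{clean}VisitDistance = {distance} "Distance in meters to mark {obj_type} as visited."\n'
--         f'Announce{clean}Visits = {announce} "Announce when {obj_type} objects are reached."'
--     )
--
--
-- def generate_map_specific_game_objects_config(map_name: str, object_types: List[str]) -> str:
--     # One pass over the input: partition into canonical types (deduplicated via a
--     # seen-set, since canonical types are emitted once) and the rest; then sort the
--     # canonical ones by their precomputed canonical rank and the rest alphabetically.
--     rank = {t: i for i, t in enumerate(_CANON)}
--     canon_present = []
--     extras = []
--     seen = set()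
--     for t in object_types:
--         if t in rank:
--             if t not in seen:
--                 seen.add(t)
--                 canon_present.append(t)
--         else:
--             extras.append(t)
--     canon_present.sort(key=lambda t: rank[t])  # every element is a key of rank
--     extras.sort()
--     return '\n'.join(_block(t) for t in canon_present + extras)
-- ===== Notes on version B (the rewrite author's own statement) =====
-- stated objective: alternative
-- what changed: Instead of A's two-phase ordering (scan the 31-entry canonical list filtering by membership, then sort the leftovers) B makes one partitioning pass over the input with a seen-set that deduplicates canonical types, sorts the canonical ones by a precomputed rank dictionary and the extras alphabetically, and the per-type if/elif default chain is replaced by one lookup table of (track, distance, announce) triples.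
import Mathlib
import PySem

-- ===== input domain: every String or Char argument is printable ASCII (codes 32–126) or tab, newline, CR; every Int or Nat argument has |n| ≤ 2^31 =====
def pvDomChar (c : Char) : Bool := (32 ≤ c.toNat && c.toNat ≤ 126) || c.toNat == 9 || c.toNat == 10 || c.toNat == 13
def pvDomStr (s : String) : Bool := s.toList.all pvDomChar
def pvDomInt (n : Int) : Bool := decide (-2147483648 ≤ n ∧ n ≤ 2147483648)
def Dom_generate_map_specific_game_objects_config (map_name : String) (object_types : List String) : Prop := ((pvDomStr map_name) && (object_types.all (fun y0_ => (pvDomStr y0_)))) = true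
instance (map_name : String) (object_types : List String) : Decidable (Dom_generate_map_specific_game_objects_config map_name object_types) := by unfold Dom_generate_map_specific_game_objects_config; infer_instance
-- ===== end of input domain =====

-- B reorders by one partitioning pass (seen-set dedup) plus a rank-keyed sort instead of A's
-- canonical-list scan + leftover sort, and looks the per-type defaults up in one table instead
-- of A's if/elif chain; objective: alternative (same observable output, no speed claim).

-- ===== PORT A =====
def get_game_objects_config_order : List String :=
  ["Ammoboxes", "BlackMarketCases", "Bushes", "Campfires", "CapturePoints",
   "Carssport", "Carssuv", "Cashregisters", "Chests", "Dumpsters",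
   "Fishingholes", "Fishingrods", "Gasstations", "Geysers", "Gold",
   "HiveStashes", "IceBoxes", "Jobboards", "Jobboardssupplydrop",
   "Jobboardstreasure", "JobboardsVehicle", "Launchpads", "Mushrooms",
   "OxrBunkers", "OxrChests", "Rebootvans", "Safes", "Slurpbarrels",
   "Slurptrucks", "SwarmerNests", "Ziplines"]

def generate_map_specific_game_objects_config (map_name : String) (object_types : List String) : String :=
  let config_order := get_game_objects_config_order
  -- for canonical_type in config_order: if canonical_type in object_types: ordered_types.append(...)
  let ordered_types : List String :=
    config_order.foldl (fun acc canonical_type =>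
      if object_types.contains canonical_type then acc ++ [canonical_type] else acc) []
  -- remaining_types = sorted([t for t in object_types if t not in config_order])
  let remaining_types :=
    PySem.List.sorted (object_types.filter (fun t => !config_order.contains t)) (fun t => t)
  let ordered_types := ordered_types ++ remaining_types
  -- emit loop with the if/elif default chain
  let config_lines : List String :=
    ordered_types.foldl (fun acc obj_type =>
      acc ++
        (let clean_type :=
          PySem.Str.replace (PySem.Str.replace (PySem.Str.replace obj_type " " "") "_" "") "-" ""
        let defaults : String × String × String :=
          if (["Ammoboxes", "Campfires", "Carssport", "Carssuv", "Cashregisters", "Gold",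
               "Fishingrods", "Jobboards", "Jobboardssupplydrop", "Jobboardstreasure",
               "Mushrooms"] : List String).contains obj_type then ("true", "1", "true")
          else if (["Bushes"] : List String).contains obj_type then ("true", "3", "false")
          else if (["Rebootvans", "Gasstations"] : List String).contains obj_type then ("true", "3", "true")
          else if (["Chests"] : List String).contains obj_type then ("true", "5", "false")
          else if (["Launchpads"] : List String).contains obj_type then ("false", "0", "false")
          else if (["Bushes", "Fishingholes"] : List String).contains obj_type then ("true", "8.0", "false")
          else if (["Slurpbarrels", "Slurptrucks", "Safes", "Ziplines"] : List String).contains obj_type then ("true", "8.0", "false")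
          else ("true", "8.0", "false")
        ["TrackVisits" ++ clean_type ++ " = " ++ defaults.1 ++ " \"Track visits to " ++ obj_type ++ " objects in matches.\"",
         clean_type ++ "VisitDistance = " ++ defaults.2.1 ++ " \"Distance in meters to mark " ++ obj_type ++ " as visited.\"",
         "Announce" ++ clean_type ++ "Visits = " ++ defaults.2.2 ++ " \"Announce when " ++ obj_type ++ " objects are reached.\""])) []
  PySem.Str.join "\n" config_lines

-- ===== PORT B =====
def pvCanon : List String :=
  ["Ammoboxes", "BlackMarketCases", "Bushes", "Campfires", "CapturePoints",
   "Carssport", "Carssuv", "Cashregisters", "Chests", "Dumpsters",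
   "Fishingholes", "Fishingrods", "Gasstations", "Geysers", "Gold",
   "HiveStashes", "IceBoxes", "Jobboards", "Jobboardssupplydrop",
   "Jobboardstreasure", "JobboardsVehicle", "Launchpads", "Mushrooms",
   "OxrBunkers", "OxrChests", "Rebootvans", "Safes", "Slurpbarrels",
   "Slurptrucks", "SwarmerNests", "Ziplines"]

def pvBase : String × String × String := ("true", "8.0", "false")

def pvSpecialPairs : List (String × (String × String × String)) :=
    [("Ammoboxes", ("true", "1", "true")),
     ("Campfires", ("true", "1", "true")),
     ("Carssport", ("true", "1", "true")),
     ("Carssuv", ("true", "1", "true")),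
     ("Cashregisters", ("true", "1", "true")),
     ("Gold", ("true", "1", "true")),
     ("Fishingrods", ("true", "1", "true")),
     ("Jobboards", ("true", "1", "true")),
     ("Jobboardssupplydrop", ("true", "1", "true")),
     ("Jobboardstreasure", ("true", "1", "true")),
     ("Mushrooms", ("true", "1", "true")),
     ("Bushes", ("true", "3", "false")),
     ("Rebootvans", ("true", "3", "true")),
     ("Gasstations", ("true", "3", "true")),
     ("Chests", ("true", "5", "false")),
     ("Launchpads", ("false", "0", "false"))]

def pvSpecial : PySem.Dict String (String × String × String) :=
  PySem.Dict.ofList pvSpecialPairs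

def pvBlock (obj_type : String) : String :=
  let clean :=
    PySem.Str.replace (PySem.Str.replace (PySem.Str.replace obj_type " " "") "_" "") "-" ""
  let defaults := PySem.Dict.getD pvSpecial obj_type pvBase
  "TrackVisits" ++ clean ++ " = " ++ defaults.1 ++ " \"Track visits to " ++ obj_type ++ " objects in matches.\"" ++ "\n" ++
  (clean ++ "VisitDistance = " ++ defaults.2.1 ++ " \"Distance in meters to mark " ++ obj_type ++ " as visited.\"" ++ "\n" ++
  ("Announce" ++ clean ++ "Visits = " ++ defaults.2.2 ++ " \"Announce when " ++ obj_type ++ " objects are reached.\""))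

-- rank = {t: i for i, t in enumerate(_CANON)}
def pvRank : PySem.Dict String Int :=
  PySem.Dict.ofList ((PySem.List.enumerate pvCanon).map (fun p => (p.2, p.1)))

-- one iteration of B's partitioning loop; state = (canon_present, extras, seen)
def pvStep (st : List String × List String × PySem.Set String) (t : String) :
    List String × List String × PySem.Set String :=
  if PySem.Dict.contains pvRank t then
    if PySem.Set.contains st.2.2 t then st
    else (st.1 ++ [t], st.2.1, PySem.Set.add st.2.2 t)
  else (st.1, st.2.1 ++ [t], st.2.2)

def generate_map_specific_game_objects_config_alt (map_name : String) (object_types : List String) : String :=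
  let st := object_types.foldl pvStep ([], [], PySem.Set.empty)
  -- canon_present.sort(key=lambda t: rank[t]) — every element of canon_present is a key of
  -- rank, so the total lookup getD with an arbitrary default computes exactly rank[t]
  let canon_present := PySem.List.sorted st.1 (fun t => PySem.Dict.getD pvRank t 0)
  let extras := PySem.List.sorted st.2.1 (fun t => t)
  PySem.Str.join "\n" ((canon_present ++ extras).map pvBlock)

-- ===== PRECONDITION & SPEC =====
def Spec_generate_map_specific_game_objects_config (map_name : String) (object_types : List String) (out : String) : Prop := out = generate_map_specific_game_objects_config_alt map_name object_types
instance (map_name : String) (object_types : List String) (out : String) : Decidable (Spec_generate_map_specific_game_objects_config map_name object_types out) := by unfold Spec_generate_map_specific_game_objects_config; infer_instance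

-- ===== CLAIM (what is proved, stated in full; the proofs are below) =====
def Claim_equal_generate_map_specific_game_objects_config : Prop := ∀ (map_name : String) (object_types : List String), Dom_generate_map_specific_game_objects_config map_name object_types → Spec_generate_map_specific_game_objects_config map_name object_types (generate_map_specific_game_objects_config map_name object_types)

-- ===== LEMMAS AND PROOFS =====

-- A's if/elif chain, restated as a proof-side function.
def pvChain (obj_type : String) : String × String × String :=
  if (["Ammoboxes", "Campfires", "Carssport", "Carssuv", "Cashregisters", "Gold",
       "Fishingrods", "Jobboards", "Jobboardssupplydrop", "Jobboardstreasure",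
       "Mushrooms"] : List String).contains obj_type then ("true", "1", "true")
  else if (["Bushes"] : List String).contains obj_type then ("true", "3", "false")
  else if (["Rebootvans", "Gasstations"] : List String).contains obj_type then ("true", "3", "true")
  else if (["Chests"] : List String).contains obj_type then ("true", "5", "false")
  else if (["Launchpads"] : List String).contains obj_type then ("false", "0", "false")
  else if (["Bushes", "Fishingholes"] : List String).contains obj_type then ("true", "8.0", "false")
  else if (["Slurpbarrels", "Slurptrucks", "Safes", "Ziplines"] : List String).contains obj_type then ("true", "8.0", "false")
  else ("true", "8.0", "false")

-- the table agrees with the chain on every string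
lemma pvChain_eq_getD (t : String) : pvChain t = PySem.Dict.getD pvSpecial t pvBase := by
  rcases eq_or_ne t "Ammoboxes" with rfl | h1; · decide
  rcases eq_or_ne t "Campfires" with rfl | h2; · decide
  rcases eq_or_ne t "Carssport" with rfl | h3; · decide
  rcases eq_or_ne t "Carssuv" with rfl | h4; · decide
  rcases eq_or_ne t "Cashregisters" with rfl | h5; · decide
  rcases eq_or_ne t "Gold" with rfl | h6; · decide
  rcases eq_or_ne t "Fishingrods" with rfl | h7; · decide
  rcases eq_or_ne t "Jobboards" with rfl | h8; · decide
  rcases eq_or_ne t "Jobboardssupplydrop" with rfl | h9; · decide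
  rcases eq_or_ne t "Jobboardstreasure" with rfl | h10; · decide
  rcases eq_or_ne t "Mushrooms" with rfl | h11; · decide
  rcases eq_or_ne t "Bushes" with rfl | h12; · decide
  rcases eq_or_ne t "Rebootvans" with rfl | h13; · decide
  rcases eq_or_ne t "Gasstations" with rfl | h14; · decide
  rcases eq_or_ne t "Chests" with rfl | h15; · decide
  rcases eq_or_ne t "Launchpads" with rfl | h16; · decide
  rcases eq_or_ne t "Fishingholes" with rfl | h17; · decide
  rcases eq_or_ne t "Slurpbarrels" with rfl | h18; · decide
  rcases eq_or_ne t "Slurptrucks" with rfl | h19; · decide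
  rcases eq_or_ne t "Safes" with rfl | h20; · decide
  rcases eq_or_ne t "Ziplines" with rfl | h21; · decide
  have hmk : pvSpecial = PySem.Dict.mk pvSpecialPairs := by decide
  simp [pvChain, hmk, pvSpecialPairs, pvBase, PySem.Dict.getD_eq_get?_getD,
    PySem.Dict.get?_mk_cons, PySem.Dict.get?,
    h1, h2, h3, h4, h5, h6, h7, h8, h9, h10, h11, h12, h13, h14, h15, h16, h17, h18, h19, h20, h21,
    Ne.symm h1, Ne.symm h2, Ne.symm h3, Ne.symm h4, Ne.symm h5, Ne.symm h6, Ne.symm h7,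
    Ne.symm h8, Ne.symm h9, Ne.symm h10, Ne.symm h11, Ne.symm h12, Ne.symm h13, Ne.symm h14,
    Ne.symm h15, Ne.symm h16, Ne.symm h17, Ne.symm h18, Ne.symm h19, Ne.symm h20, Ne.symm h21]

-- A's per-type three lines, restated as a proof-side function.
def pvLines (obj_type : String) : List String :=
  let clean_type :=
    PySem.Str.replace (PySem.Str.replace (PySem.Str.replace obj_type " " "") "_" "") "-" ""
  let defaults := pvChain obj_type
  ["TrackVisits" ++ clean_type ++ " = " ++ defaults.1 ++ " \"Track visits to " ++ obj_type ++ " objects in matches.\"",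
   clean_type ++ "VisitDistance = " ++ defaults.2.1 ++ " \"Distance in meters to mark " ++ obj_type ++ " as visited.\"",
   "Announce" ++ clean_type ++ "Visits = " ++ defaults.2.2 ++ " \"Announce when " ++ obj_type ++ " objects are reached.\""]

-- B's block is A's three lines joined by "\n"
lemma pvBlock_eq_join (t : String) :
    (pvBlock t).toList = PySem.Chars.join "\n".toList (List.map String.toList (pvLines t)) := by
  dsimp only [pvBlock, pvLines]
  rw [pvChain_eq_getD]
  simp [PySem.Chars.join_cons_cons, PySem.Chars.join_singleton, List.append_assoc]

lemma pvLines_ne_nil (t : String) : pvLines t ≠ [] := by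
  simp [pvLines]

-- joining: a nonempty group followed by a nonempty rest
lemma pvJoin_append_ne (sep : List Char) (gp M : List (List Char)) (hgp : gp ≠ []) (hM : M ≠ []) :
    PySem.Chars.join sep (gp ++ M) =
      PySem.Chars.join sep gp ++ sep ++ PySem.Chars.join sep M := by
  induction gp with
  | nil => exact absurd rfl hgp
  | cons x t ih =>
    cases t with
    | nil =>
      cases M with
      | nil => exact absurd rfl hM
      | cons m ms =>
        rw [List.singleton_append, PySem.Chars.join_cons_cons, PySem.Chars.join_singleton]
    | cons y tt =>
      have ih' := ih (by simp)
      have h1 : ((x :: y :: tt) ++ M) = x :: ((y :: tt) ++ M) := rfl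
      have h2 : ((y :: tt) ++ M) = y :: (tt ++ M) := rfl
      rw [h1, h2, PySem.Chars.join_cons_cons, ← h2, ih', PySem.Chars.join_cons_cons]
      simp [List.append_assoc]

-- joining the flattening of nonempty groups = joining the per-group joins
lemma pvJoin_flatten (sep : List Char) (L : List (List (List Char))) (h : ∀ g ∈ L, g ≠ []) :
    PySem.Chars.join sep L.flatten = PySem.Chars.join sep (L.map (PySem.Chars.join sep)) := by
  induction L with
  | nil => rfl
  | cons gp rest ih =>
    have hgp : gp ≠ [] := h gp (by simp)
    have hrest : ∀ g ∈ rest, g ≠ [] := fun g hg => h g (by simp [hg])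
    have ihr := ih hrest
    cases rest with
    | nil => simp
    | cons g2 r2 =>
      have hne : (g2 :: r2).flatten ≠ [] := by
        have hg2 : g2 ≠ [] := hrest g2 (by simp)
        cases g2 with
        | nil => exact absurd rfl hg2
        | cons a b => simp
      rw [List.flatten_cons, pvJoin_append_ne sep gp _ hgp hne, ihr]
      simp only [List.map_cons]
      rw [PySem.Chars.join_cons_cons]

-- main helper: joining A's flat line list = joining B's block list
lemma pvMain (ordered : List String) :
    PySem.Str.join "\n" (ordered.flatMap pvLines) = PySem.Str.join "\n" (ordered.map pvBlock) := by
  unfold PySem.Str.join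
  apply congrArg String.ofList
  have h1 : List.map String.toList (ordered.flatMap pvLines)
      = (ordered.map (fun t => List.map String.toList (pvLines t))).flatten := by
    simp [List.flatMap_def, List.map_flatten, List.map_map, Function.comp_def]
  rw [h1, pvJoin_flatten _ _ (by
    intro g hg
    simp only [List.mem_map] at hg
    obtain ⟨t, _, rfl⟩ := hg
    simpa using pvLines_ne_nil t)]
  simp only [List.map_map, Function.comp_def]
  exact congrArg (PySem.Chars.join (String.toList "\n"))
    (List.map_congr_left fun t _ => (pvBlock_eq_join t).symm)

-- membership test against the rank dict = membership test against the canonical list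
lemma pvRank_contains (t : String) :
    PySem.Dict.contains pvRank t = pvCanon.contains t := by
  have hk : pvRank.keys = pvCanon := by decide
  rw [PySem.Dict.contains_eq_decide_mem_keys, hk]
  simp

-- B's partition loop: the extras component collects the non-canonical occurrences in order
lemma pvPart_extras (xs : List String) (a1 a2 : List String) (s : PySem.Set String) :
    (xs.foldl pvStep (a1, a2, s)).2.1
      = a2 ++ xs.filter (fun t => !PySem.Dict.contains pvRank t) := by
  induction xs generalizing a1 a2 s with
  | nil => simp
  | cons t xs ih =>
    by_cases hc : PySem.Dict.contains pvRank t = true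
    · by_cases hs : t ∈ (s : List String)
      · have hstep : pvStep (a1, a2, s) t = (a1, a2, s) := by
          simp [pvStep, hc, hs]
        rw [List.foldl_cons, hstep, ih]
        simp [hc]
      · have hstep : pvStep (a1, a2, s) t = (a1 ++ [t], a2, PySem.Set.add s t) := by
          simp [pvStep, hc, hs]
        rw [List.foldl_cons, hstep, ih]
        simp [hc]
    · have hstep : pvStep (a1, a2, s) t = (a1, a2 ++ [t], s) := by
        simp [pvStep, hc]
      rw [List.foldl_cons, hstep, ih]
      simp [hc, List.append_assoc]

-- B's partition loop: the canon_present component is nodup and holds exactly the canonical members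
lemma pvPart_canon (xs : List String) (a1 a2 : List String) (s : PySem.Set String)
    (hiff : ∀ u, u ∈ (s : List String) ↔ u ∈ a1) (hnd : a1.Nodup) (hsnd : (s : List String).Nodup) :
    (xs.foldl pvStep (a1, a2, s)).1.Nodup ∧
      ∀ u, u ∈ (xs.foldl pvStep (a1, a2, s)).1
        ↔ u ∈ a1 ∨ (u ∈ xs ∧ PySem.Dict.contains pvRank u = true) := by
  induction xs generalizing a1 a2 s with
  | nil => simpa using hnd
  | cons t xs ih =>
    by_cases hc : PySem.Dict.contains pvRank t = true
    · by_cases hs : t ∈ (s : List String)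
      · have ht : t ∈ a1 := (hiff t).mp hs
        have hstep : pvStep (a1, a2, s) t = (a1, a2, s) := by
          simp [pvStep, hc, hs]
        rw [List.foldl_cons, hstep]
        obtain ⟨h1, h2⟩ := ih a1 a2 s hiff hnd hsnd
        refine ⟨h1, fun u => ?_⟩
        rw [h2 u]
        constructor
        · rintro (h | ⟨h, hk⟩)
          · exact Or.inl h
          · exact Or.inr ⟨List.mem_cons_of_mem _ h, hk⟩
        · rintro (h | ⟨h, hk⟩)
          · exact Or.inl h
          · rcases List.mem_cons.mp h with rfl | h
            · exact Or.inl ht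
            · exact Or.inr ⟨h, hk⟩
      · have hta : t ∉ a1 := fun h => hs ((hiff t).mpr h)
        have hadd : (PySem.Set.add s t : List String) = (s : List String) ++ [t] :=
          PySem.Set.add_of_not_mem hs
        have hstep : pvStep (a1, a2, s) t = (a1 ++ [t], a2, PySem.Set.add s t) := by
          simp [pvStep, hc, hs]
        rw [List.foldl_cons, hstep]
        have hiff' : ∀ u, u ∈ (PySem.Set.add s t : List String) ↔ u ∈ a1 ++ [t] := by
          intro u; rw [hadd]; simp [hiff u]
        have hnd' : (a1 ++ [t]).Nodup := by
          simp [List.nodup_append, hnd, hta]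
          exact fun a ha h => hta (h ▸ ha)
        have hsnd' : (PySem.Set.add s t : List String).Nodup := by
          rw [hadd]
          simp [List.nodup_append, hsnd, hs]
          exact fun a ha h => hs (h ▸ ha)
        obtain ⟨h1, h2⟩ := ih (a1 ++ [t]) a2 (PySem.Set.add s t) hiff' hnd' hsnd'
        refine ⟨h1, fun u => ?_⟩
        rw [h2 u]
        constructor
        · rintro (h | ⟨h, hk⟩)
          · rcases List.mem_append.mp h with h | h
            · exact Or.inl h
            · rcases List.mem_singleton.mp h with rfl
              exact Or.inr ⟨List.mem_cons_self .., hc⟩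
          · exact Or.inr ⟨List.mem_cons_of_mem _ h, hk⟩
        · rintro (h | ⟨h, hk⟩)
          · exact Or.inl (List.mem_append.mpr (Or.inl h))
          · rcases List.mem_cons.mp h with rfl | h
            · exact Or.inl (List.mem_append.mpr (Or.inr (List.mem_singleton.mpr rfl)))
            · exact Or.inr ⟨h, hk⟩
    · have hstep : pvStep (a1, a2, s) t = (a1, a2 ++ [t], s) := by
        simp [pvStep, hc]
      rw [List.foldl_cons, hstep]
      obtain ⟨h1, h2⟩ := ih a1 (a2 ++ [t]) s hiff hnd hsnd
      refine ⟨h1, fun u => ?_⟩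
      rw [h2 u]
      constructor
      · rintro (h | ⟨h, hk⟩)
        · exact Or.inl h
        · exact Or.inr ⟨List.mem_cons_of_mem _ h, hk⟩
      · rintro (h | ⟨h, hk⟩)
        · exact Or.inl h
        · rcases List.mem_cons.mp h with rfl | h
          · exact absurd hk hc
          · exact Or.inr ⟨h, hk⟩

-- the canonical list is strictly increasing under the rank key
set_option maxRecDepth 8192 in
lemma pvCanon_pairwise :
    pvCanon.Pairwise (fun a b => PySem.Dict.getD pvRank a 0 < PySem.Dict.getD pvRank b 0) := by
  decide

set_option maxRecDepth 8192 in
lemma pvCanon_nodup : pvCanon.Nodup := by decide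

-- sorting B's deduplicated canonical members by rank yields A's canonical-order filter
lemma pvSorted_canon (object_types : List String) :
    PySem.List.sorted ((object_types.foldl pvStep ([], [], PySem.Set.empty)).1)
        (fun t => PySem.Dict.getD pvRank t 0)
      = pvCanon.filter (fun c => object_types.contains c) := by
  have hpart := pvPart_canon object_types [] [] PySem.Set.empty (by simp [PySem.Set.empty]) (by simp)
    (by simp [PySem.Set.empty])
  apply PySem.List.sorted_eq_of_perm_of_pairwise_lt
  · -- the filter is a permutation of the loop's canon_present
    rw [List.perm_ext_iff_of_nodup (List.Nodup.filter _ pvCanon_nodup) hpart.1]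
    intro u
    rw [hpart.2 u, List.mem_filter]
    simp [pvRank_contains, And.comm]
  · exact List.Pairwise.filter _ pvCanon_pairwise

-- ===== VERDICT (by name: the statement is the Claim_ definition above) =====
theorem generate_map_specific_game_objects_config_spec : Claim_equal_generate_map_specific_game_objects_config := by
  intro map_name object_types _hdom
  unfold Spec_generate_map_specific_game_objects_config
  have hA : generate_map_specific_game_objects_config map_name object_types
      = PySem.Str.join "\n"
          (((get_game_objects_config_order.foldl
              (fun acc c => if object_types.contains c then acc ++ [c] else acc) []) ++
            PySem.List.sorted (object_types.filter (fun t => !get_game_objects_config_order.contains t)) (fun t => t)).foldl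
            (fun acc x => acc ++ pvLines x) []) := rfl
  have hB : generate_map_specific_game_objects_config_alt map_name object_types
      = PySem.Str.join "\n"
          ((PySem.List.sorted ((object_types.foldl pvStep ([], [], PySem.Set.empty)).1)
              (fun t => PySem.Dict.getD pvRank t 0) ++
            PySem.List.sorted ((object_types.foldl pvStep ([], [], PySem.Set.empty)).2.1)
              (fun t => t)).map pvBlock) := rfl
  rw [hA, hB, PySem.List.foldl_append_if_eq_filter, List.nil_append,
    PySem.List.foldl_append_eq_flatMap, List.nil_append]
  have hco : get_game_objects_config_order = pvCanon := rfl
  rw [hco, pvSorted_canon, pvPart_extras, List.nil_append]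
  have hfil : (object_types.filter (fun t => !PySem.Dict.contains pvRank t))
      = object_types.filter (fun t => !pvCanon.contains t) := by
    apply List.filter_congr
    intro t _
    rw [pvRank_contains]
  rw [hfil]
  exact pvMain _
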